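-- pv_equiv track=rewrite | github.com/angelina6k/2024.VKN | -6 -ВКН.(Пз) -Пз.(9) -(7)/-6 -ВКН.(Пз) -Пз.(9) -В.(7.1).py | generate_polygon_name
-- ===== SOURCE A (Python) =====
-- def generate_polygon_name(sides, start_letter):
--     alphabet = "ABCDEFGHIJKLMNOPQRSTUVWXYZ"
--     start_index = alphabet.index(start_letter.upper())
--     polygon_name = ""
--
--     for i in range(sides):
--         letter_index = (start_index + i) % len(alphabet)
--         polygon_name += alphabet[letter_index]
--
--     return polygon_name
-- ===== SOURCE B (Python) =====
-- def generate_polygon_name(sides, start_letter):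
--     alphabet = "ABCDEFGHIJKLMNOPQRSTUVWXYZ"
--     start_index = alphabet.index(start_letter.upper())
--     n = max(sides, 0)
--     k = (start_index + n) // 26 + 1
--     return (alphabet * k)[start_index:start_index + n]
-- ===== Notes on version B (the rewrite author's own statement) =====
-- stated objective: simpler
-- what changed: Replaces the per-character loop with per-position modulo indexing and string concatenation by one slice of a repeated alphabet whose length covers the request.
import Mathlib
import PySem

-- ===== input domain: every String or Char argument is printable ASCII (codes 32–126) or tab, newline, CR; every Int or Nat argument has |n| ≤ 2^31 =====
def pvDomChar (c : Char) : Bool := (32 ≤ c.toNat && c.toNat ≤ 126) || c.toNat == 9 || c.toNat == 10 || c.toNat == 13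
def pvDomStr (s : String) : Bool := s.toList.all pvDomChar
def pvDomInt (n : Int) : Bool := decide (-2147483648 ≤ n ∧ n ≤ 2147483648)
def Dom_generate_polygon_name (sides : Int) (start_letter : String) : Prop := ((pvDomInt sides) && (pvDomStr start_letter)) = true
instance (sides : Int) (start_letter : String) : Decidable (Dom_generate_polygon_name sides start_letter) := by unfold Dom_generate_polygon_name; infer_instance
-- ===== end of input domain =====

-- B replaces A's per-character loop (modulo index + quadratic string concatenation) by one
-- slice of a repeated alphabet that covers the request; same value and same ValueError inputs.

-- ===== PORT A =====
def generate_polygon_name (sides : Int) (start_letter : String) : String :=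
  let alphabet := "ABCDEFGHIJKLMNOPQRSTUVWXYZ"
  let start_index := PySem.Str.find alphabet (PySem.Str.upper start_letter)
  -- 'alphabet[letter_index]' never raises: 0 ≤ letter_index < 26, so pyGetD's default is dead
  let polygon_name := (PySem.List.pyRange 0 sides).foldl
      (fun acc i =>
        acc ++ [PySem.List.pyGetD alphabet.toList
                  (PySem.Int.mod (start_index + i) (PySem.Str.len alphabet)) 'A']) []
  String.mk polygon_name

-- ===== PORT B =====
def generate_polygon_name_alt (sides : Int) (start_letter : String) : String :=
  let alphabet := "ABCDEFGHIJKLMNOPQRSTUVWXYZ"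
  let start_index := PySem.Str.find alphabet (PySem.Str.upper start_letter)
  let n := max sides 0
  let k := PySem.Int.floordiv (start_index + n) 26 + 1
  String.mk (PySem.List.slice (PySem.List.pyRepeat alphabet.toList k)
      (some start_index) (some (start_index + n)))

-- ===== PRECONDITION & SPEC =====
-- Pre_ excludes exactly the inputs where Python's alphabet.index raises ValueError:
-- start_letter.upper() must occur as a substring of the uppercase alphabet.
def Pre_generate_polygon_name (sides : Int) (start_letter : String) : Prop :=
  PySem.Str.isIn (PySem.Str.upper start_letter) "ABCDEFGHIJKLMNOPQRSTUVWXYZ" = true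
instance (sides : Int) (start_letter : String) : Decidable (Pre_generate_polygon_name sides start_letter) := by unfold Pre_generate_polygon_name; infer_instance
def pvWitness_generate_polygon_name : Int × String := (3, "x")

def Spec_generate_polygon_name (sides : Int) (start_letter : String) (out : String) : Prop := out = generate_polygon_name_alt sides start_letter
instance (sides : Int) (start_letter : String) (out : String) : Decidable (Spec_generate_polygon_name sides start_letter out) := by unfold Spec_generate_polygon_name; infer_instance

-- ===== CLAIM (what is proved, stated in full; the proofs are below) =====
def Claim_equal_generate_polygon_name : Prop := ∀ (sides : Int) (start_letter : String), Dom_generate_polygon_name sides start_letter → Pre_generate_polygon_name sides start_letter → Spec_generate_polygon_name sides start_letter (generate_polygon_name sides start_letter)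

-- ===== LEMMAS AND PROOFS =====

lemma pv_flatten_replicate_length {α : Type} (al : List α) (K : Nat) :
    ((List.replicate K al).flatten).length = K * al.length := by
  induction K with
  | zero => simp
  | succ k ih =>
    rw [List.replicate_succ, List.flatten_cons, List.length_append, ih, Nat.succ_mul]
    omega

lemma pv_flatten_replicate_getElem {α : Type} (al : List α) (K j : Nat)
    (hal : 0 < al.length) (h : j < ((List.replicate K al).flatten).length) :
    ((List.replicate K al).flatten)[j] = al[j % al.length]'(Nat.mod_lt _ hal) := by
  induction K generalizing j with
  | zero => simp at h
  | succ k ih =>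
    simp only [List.replicate_succ, List.flatten_cons] at h ⊢
    by_cases hj : j < al.length
    · rw [List.getElem_append_left hj]
      congr 1
      exact (Nat.mod_eq_of_lt hj).symm
    · rw [List.length_append] at h
      rw [List.getElem_append_right (le_of_not_gt hj)]
      have h' : j - al.length < ((List.replicate k al).flatten).length := by omega
      refine (ih (j - al.length) h').trans ?_
      congr 1
      exact (Nat.mod_eq_sub_mod (le_of_not_gt hj)).symm

lemma pv_lists_eq (S N : Nat) :
    (List.range N).map (fun (k : Nat) =>
        PySem.List.pyGetD ("ABCDEFGHIJKLMNOPQRSTUVWXYZ".toList)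
          (PySem.Int.mod ((S : Int) + (k : Int)) 26) 'A')
      = List.take N (List.drop S
          ((List.replicate ((S + N) / 26 + 1) "ABCDEFGHIJKLMNOPQRSTUVWXYZ".toList).flatten)) := by
  have hlen : ("ABCDEFGHIJKLMNOPQRSTUVWXYZ".toList).length = 26 := by decide
  have hbig : S + N < ((S + N) / 26 + 1) * 26 := by
    have := Nat.div_add_mod (S + N) 26
    have := Nat.mod_lt (S + N) (by omega : 0 < 26)
    omega
  apply List.ext_getElem
  · simp only [List.length_map, List.length_range, List.length_take, List.length_drop,
      pv_flatten_replicate_length, hlen]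
    omega
  · intro i h1 h2
    simp only [List.getElem_map, List.getElem_range, List.getElem_take, List.getElem_drop]
    have hi : i < N := by simpa using h1
    have hcast : (S : Int) + (i : Int) = ((S + i : Nat) : Int) := by push_cast; ring
    rw [hcast]
    have hmod : PySem.Int.mod ((S + i : Nat) : Int) 26 = (((S + i) % 26 : Nat) : Int) := by
      exact_mod_cast PySem.Int.mod_natCast (S + i) 26
    rw [hmod, PySem.List.pyGetD_natCast]
    have hflat := pv_flatten_replicate_getElem ("ABCDEFGHIJKLMNOPQRSTUVWXYZ".toList)
      ((S + N) / 26 + 1) (S + i) (by rw [hlen]; omega)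
      (by rw [pv_flatten_replicate_length, hlen]; omega)
    rw [hflat, List.getD_eq_getElem _ _ (by rw [hlen]; exact Nat.mod_lt _ (by omega))]
    congr 1

lemma pv_range_cast (sides : Int) :
    PySem.List.pyRange 0 sides = (List.range sides.toNat).map (fun (k : Nat) => (k : Int)) := by
  by_cases h : 0 ≤ sides
  · conv_lhs => rw [← Int.toNat_of_nonneg h]
    exact PySem.List.pyRange_zero_natCast sides.toNat
  · have h0 : sides.toNat = 0 := by omega
    rw [h0]
    simp only [List.range_zero, List.map_nil]
    rw [List.eq_nil_iff_forall_not_mem]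
    intro x hx
    have := (PySem.List.mem_pyRange_one).1 hx
    omega

-- ===== VERDICT (by name: the statement is the Claim_ definition above) =====
theorem generate_polygon_name_spec : Claim_equal_generate_polygon_name := by
  intro sides start_letter _ hpre
  unfold Spec_generate_polygon_name
  simp only [generate_polygon_name, generate_polygon_name_alt]
  set s := PySem.Str.find "ABCDEFGHIJKLMNOPQRSTUVWXYZ" (PySem.Str.upper start_letter) with hs
  have hs0 : 0 ≤ s := by
    rw [hs, PySem.Str.find_nonneg_iff]
    exact (PySem.Str.isIn_iff_infix _ _).1 hpre
  set S := s.toNat with hS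
  set N := sides.toNat with hN
  have hsS : s = (S : Int) := (Int.toNat_of_nonneg hs0).symm
  have hmax : max sides 0 = (N : Int) := by omega
  have hlenA : PySem.Str.len "ABCDEFGHIJKLMNOPQRSTUVWXYZ" = 26 := by decide
  have hK : PySem.Int.floordiv ((S : Int) + (N : Int)) 26 + 1 = (((S + N) / 26 + 1 : Nat) : Int) := by
    rw [PySem.Int.floordiv_eq_ediv_of_pos (by norm_num : (0 : Int) < 26)]
    push_cast
    omega
  congr 1
  simp only [hsS, hmax, hlenA]
  rw [PySem.List.foldl_append_singleton_eq_map, List.nil_append, pv_range_cast, List.map_map,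
      hK]
  simp only [PySem.List.pyRepeat, Int.toNat_natCast]
  rw [PySem.List.slice_natCast_add]
  exact pv_lists_eq S N
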